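-- pv_equiv track=rewrite | github.com/syur997/Algorithm_Python | 프로그래머스/lv1/12982. 예산/예산.py | solution
-- ===== SOURCE A (Python) =====
-- def solution(d, budget):
--     d = sorted(d)
--     x = []
--     for i in d:
--         x.append(i)
--         if sum(x) > budget :
--             x.pop()
--             return len(x)
--     return len(x)
-- ===== SOURCE B (Python) =====
-- def solution(d, budget):
--     ds = sorted(d)
--     n = 0
--     while n < len(ds) and ds[n] <= budget:
--         budget -= ds[n]
--         n += 1
--     return n
-- ===== Notes on version B (the rewrite author's own statement) =====
-- stated objective: faster
-- what changed: B replaces A's prefix-list rebuilding and re-summing (append/sum/pop each step) with an index-driven while loop over the sorted list that pays each item by decrementing the remaining budget, keeping no list and no running sum.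
import Mathlib
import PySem

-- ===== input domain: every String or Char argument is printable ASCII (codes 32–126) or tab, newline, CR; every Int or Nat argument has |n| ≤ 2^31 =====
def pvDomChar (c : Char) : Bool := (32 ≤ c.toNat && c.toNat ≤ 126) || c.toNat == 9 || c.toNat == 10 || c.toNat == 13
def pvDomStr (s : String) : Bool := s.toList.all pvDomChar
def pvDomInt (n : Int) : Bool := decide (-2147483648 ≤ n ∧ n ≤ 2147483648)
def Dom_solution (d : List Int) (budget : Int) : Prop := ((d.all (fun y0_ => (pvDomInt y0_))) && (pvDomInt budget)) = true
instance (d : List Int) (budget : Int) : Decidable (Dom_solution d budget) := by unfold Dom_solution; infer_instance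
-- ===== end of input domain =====

-- ===== PORT A =====
-- B walks the sorted list by index, paying items out of the remaining budget, instead of rebuilding and re-summing a prefix list; objective: faster.
-- A's loop: state x (the prefix list built so far); append, re-sum, pop on overflow.
def solutionLoopA (budget : Int) : List Int → List Int → Int
  | [], x => x.length
  | i :: rest, x =>
      let x' := x ++ [i]
      if x'.sum > budget then (x'.dropLast).length   -- x.pop(); return len(x)
      else solutionLoopA budget rest x'

def solution (d : List Int) (budget : Int) : Int :=
  solutionLoopA budget (PySem.List.sorted d (fun x => x) false) []

-- ===== PORT B =====
-- while n < len(ds) and ds[n] <= budget: budget -= ds[n]; n += 1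
-- (fuel = ds.length - n makes the while loop a structural recursion; the guard n < len(ds) is unchanged)
def solutionWhileB (ds : List Int) : Nat → Int → Nat → Int
  | 0, _, n => (n : Int)
  | fuel + 1, budget, n =>
      if n < ds.length && decide (ds.getD n 0 ≤ budget) then
        solutionWhileB ds fuel (budget - ds.getD n 0) (n + 1)
      else (n : Int)

def solution_alt (d : List Int) (budget : Int) : Int :=
  let ds := PySem.List.sorted d (fun x => x) false
  solutionWhileB ds ds.length budget 0

-- ===== PRECONDITION & SPEC =====
def Spec_solution (d : List Int) (budget : Int) (out : Int) : Prop := out = solution_alt d budget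
instance (d : List Int) (budget : Int) (out : Int) : Decidable (Spec_solution d budget out) := by unfold Spec_solution; infer_instance

-- ===== CLAIM (what is proved, stated in full; the proofs are below) =====
def Claim_equal_solution : Prop := ∀ (d : List Int) (budget : Int), Dom_solution d budget → Spec_solution d budget (solution d budget)

-- ===== LEMMAS AND PROOFS =====
-- common yardstick: structural count of affordable items along a list
def payCount (budget : Int) : List Int → Int
  | [] => 0
  | i :: rest => if budget < i then 0 else 1 + payCount (budget - i) rest

theorem solutionLoopA_eq_payCount (budget : Int) (l x : List Int) :
    solutionLoopA budget l x = x.length + payCount (budget - x.sum) l := by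
  induction l generalizing x with
  | nil => simp [solutionLoopA, payCount]
  | cons i rest ih =>
      simp only [solutionLoopA, payCount]
      have hs : (x ++ [i]).sum = x.sum + i := by simp
      have hd : (x ++ [i]).dropLast = x := by simp
      rw [hs, hd]
      by_cases h : x.sum + i > budget
      · rw [if_pos h, if_pos (by omega)]
        simp
      · rw [if_neg h, if_neg (by omega), ih, hs, sub_add_eq_sub_sub]
        simp [List.length_append]
        ring
  
theorem solutionWhileB_eq_payCount (ds : List Int) (fuel : Nat) (budget : Int) (n : Nat)
    (hn : n + fuel = ds.length) :
    solutionWhileB ds fuel budget n = n + payCount budget (ds.drop n) := by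
  induction fuel generalizing budget n with
  | zero =>
      have : ds.drop n = [] := by
        apply List.drop_eq_nil_of_le
        omega
      simp [solutionWhileB, this, payCount]
  | succ fuel ih =>
      have h : n < ds.length := by omega
      have hdrop : ds.drop n = ds[n] :: ds.drop (n + 1) := List.drop_eq_getElem_cons h
      have hget : ds.getD n 0 = ds[n] := List.getD_eq_getElem ds 0 h
      rw [solutionWhileB, hget, hdrop]
      by_cases hle : ds[n] ≤ budget
      · rw [if_pos (by simp [h, hle]), ih (budget - ds[n]) (n + 1) (by omega)]
        simp only [payCount]
        rw [if_neg (by omega)]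
        push_cast
        ring
      · rw [if_neg (by simp [hle])]
        simp only [payCount]
        rw [if_pos (by omega)]
        omega

-- ===== VERDICT (by name: the statement is the Claim_ definition above) =====
theorem solution_spec : Claim_equal_solution := by
  intro d budget _
  unfold Spec_solution solution solution_alt
  rw [solutionLoopA_eq_payCount, solutionWhileB_eq_payCount _ _ _ _ (by simp)]
  simp
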